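-- pv_equiv track=rewrite | github.com/EunkyuLeee/problem-solving | baekjoon/1036.py | i36tos
-- ===== SOURCE A (Python) =====
-- def i36tos(num):
--     m = []
--     while num > 36:
--         m.append(num % 36)
--         num //= 36
--     resStr = [str(num) if 0 <= num <= 9 else chr(ord('A') + num - 10)]
--     for a in reversed(m):
--         resStr.append(str(a) if 0 <= a <= 9 else chr(ord('A') + a - 10))
--     return resStr
-- ===== SOURCE B (Python) =====
-- def i36tos(num):
--     def d2c(d):
--         return str(d) if 0 <= d <= 9 else chr(ord('A') + d - 10)
--     if num > 36:
--         return i36tos(num // 36) + [d2c(num % 36)]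
--     return [d2c(num)]
-- ===== Notes on version B (the rewrite author's own statement) =====
-- stated objective: simpler
-- what changed: Replaces the accumulate-digits-then-reverse loop with a direct recursion on the quotient that builds the digit list front-to-back, removing the intermediate list and the reversal; Pre_ excludes num <= -56, where chr() gets a negative code and both A and B raise ValueError.
-- outside the precondition, e.g. on i36tos(-56): A raises ValueError, B raises ValueError
import Mathlib
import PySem

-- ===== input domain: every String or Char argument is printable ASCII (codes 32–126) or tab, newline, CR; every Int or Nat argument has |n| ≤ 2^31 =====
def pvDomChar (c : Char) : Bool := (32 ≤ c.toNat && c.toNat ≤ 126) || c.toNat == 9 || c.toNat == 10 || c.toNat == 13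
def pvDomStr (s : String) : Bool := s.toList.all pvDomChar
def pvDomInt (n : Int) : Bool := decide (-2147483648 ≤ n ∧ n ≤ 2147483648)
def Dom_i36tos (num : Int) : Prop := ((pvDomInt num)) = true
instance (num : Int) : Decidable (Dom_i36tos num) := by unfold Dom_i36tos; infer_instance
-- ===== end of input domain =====

-- B replaces A's accumulate-and-reverse loop by a direct recursion on the quotient (same digit formula, same > 36 boundary); equivalence of return values on Pre_.

-- ===== PORT A =====
-- str(d) if 0 <= d <= 9 else chr(ord('A') + d - 10)  (exact for code ≥ 0, i.e. d ≥ -55; Pre_ guarantees this for the base digit, loop digits are in 0..35)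
def pvD2C_A (d : Int) : String :=
  if 0 ≤ d ∧ d ≤ 9 then PySem.Int.toStr d
  else String.ofList [Char.ofNat (65 + d - 10).toNat]

def i36tosLoop (num : Int) (m : List Int) : Int × List Int :=
  if _h : 36 < num then
    i36tosLoop (PySem.Int.floordiv num 36) (m ++ [PySem.Int.mod num 36])
  else (num, m)
termination_by num.toNat
decreasing_by
  rw [PySem.Int.floordiv_eq_ediv_of_pos (by omega)]
  omega

def i36tos (num : Int) : List String :=
  let p := i36tosLoop num []
  p.2.reverse.foldl (fun acc a => acc ++ [pvD2C_A a]) [pvD2C_A p.1]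

-- ===== PORT B =====
def pvD2C_B (d : Int) : String :=
  if 0 ≤ d ∧ d ≤ 9 then PySem.Int.toStr d
  else String.ofList [Char.ofNat (65 + d - 10).toNat]

def i36tos_alt (num : Int) : List String :=
  if _h : 36 < num then
    i36tos_alt (PySem.Int.floordiv num 36) ++ [pvD2C_B (PySem.Int.mod num 36)]
  else [pvD2C_B num]
termination_by num.toNat
decreasing_by
  rw [PySem.Int.floordiv_eq_ediv_of_pos (by omega)]
  omega

-- ===== PRECONDITION & SPEC =====
-- Pre_ excludes num ≤ -56: there chr(ord('A') + num - 10) gets a negative code point and A raises ValueError (B's identical digit formula raises too).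
def Pre_i36tos (num : Int) : Prop := -55 ≤ num
instance (num : Int) : Decidable (Pre_i36tos num) := by unfold Pre_i36tos; infer_instance
def pvWitness_i36tos : Int := (100)

def Spec_i36tos (num : Int) (out : List String) : Prop := out = i36tos_alt num
instance (num : Int) (out : List String) : Decidable (Spec_i36tos num out) := by unfold Spec_i36tos; infer_instance

-- ===== CLAIM (what is proved, stated in full; the proofs are below) =====
def Claim_equal_i36tos : Prop := ∀ (num : Int), Dom_i36tos num → Pre_i36tos num → Spec_i36tos num (i36tos num)

-- ===== LEMMAS AND PROOFS =====

theorem pvD2C_eq : pvD2C_A = pvD2C_B := rfl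

theorem pv_loop_acc (num : Int) (m : List Int) :
    i36tosLoop num m = ((i36tosLoop num []).1, m ++ (i36tosLoop num []).2) := by
  induction num using i36tos_alt.induct generalizing m with
  | case1 n h ih =>
      have e : ∀ m' : List Int,
          i36tosLoop n m' = i36tosLoop (PySem.Int.floordiv n 36) (m' ++ [PySem.Int.mod n 36]) :=
        fun m' => by rw [i36tosLoop]; simp [h]
      rw [e, e]
      simp only [List.nil_append]
      rw [ih (m ++ [PySem.Int.mod n 36]), ih [PySem.Int.mod n 36]]
      simp
  | case2 n h =>
      have e : ∀ m' : List Int, i36tosLoop n m' = (n, m') :=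
        fun m' => by rw [i36tosLoop]; simp [h]
      rw [e, e]
      simp

theorem pv_main (num : Int) : i36tos num = i36tos_alt num := by
  induction num using i36tos_alt.induct with
  | case1 n h ih =>
      rw [i36tos_alt]
      simp only [h, dite_true]
      rw [← ih, ← pvD2C_eq]
      unfold i36tos
      rw [i36tosLoop]
      simp only [h, dite_true]
      rw [pv_loop_acc]
      simp
  | case2 n h =>
      rw [i36tos_alt, i36tos]
      rw [i36tosLoop]
      simp [h, pvD2C_eq]

-- ===== VERDICT (by name: the statement is the Claim_ definition above) =====
theorem i36tos_spec : Claim_equal_i36tos := by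
  intro num _ _
  unfold Spec_i36tos
  exact pv_main num
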